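-- pv_equiv track=rewrite | github.com/adinashby-vanier-college/programming-in-science-lab-5-Dreanna2024 | Lab5.py | hollow_square
-- ===== SOURCE A (Python) =====
-- def hollow_square(n):
--     if n < 1:
--         return ""
--     square = ""
--     i = 0
--     while i < n:
--         if i == 0 or i == n - 1:
--             square += "*" * n + "\n"
--         else:
--             square += "*" + " " * (n - 2) + "*" + "\n"
--         i += 1
--     return square.rstrip()
-- ===== SOURCE B (Python) =====
-- def hollow_square(n):
--     if n < 1:
--         return ""
--     rows = []
--     for i in range(n):
--         row = ''.join('*' if i == 0 or i == n - 1 or j == 0 or j == n - 1 else ' '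
--                       for j in range(n))
--         rows.append(row)
--     return '\n'.join(rows)
-- ===== Notes on version B (the rewrite author's own statement) =====
-- stated objective: alternative
-- what changed: B decides each cell individually with a per-character border test over a row/column grid and joins the rows with '\n', instead of A's whole-row string multiplication with a trailing-newline accumulator followed by rstrip.
import Mathlib
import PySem

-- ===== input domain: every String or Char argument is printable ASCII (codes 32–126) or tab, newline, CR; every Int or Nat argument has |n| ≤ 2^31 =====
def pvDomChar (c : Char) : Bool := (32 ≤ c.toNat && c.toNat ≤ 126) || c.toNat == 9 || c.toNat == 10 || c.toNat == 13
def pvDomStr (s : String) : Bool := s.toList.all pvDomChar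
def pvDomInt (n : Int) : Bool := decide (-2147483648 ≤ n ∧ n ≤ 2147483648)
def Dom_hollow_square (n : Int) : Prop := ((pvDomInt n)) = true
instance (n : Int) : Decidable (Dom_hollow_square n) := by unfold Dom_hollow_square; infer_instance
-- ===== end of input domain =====

-- B builds the square cell-by-cell with a border test and joins rows with '\n';
-- A multiplies whole-row strings, accumulates with trailing newlines and rstrips.
-- Same return value for every n; a genuinely different decomposition, same O(n^2) cost.

-- ===== PORT A =====
-- one iteration body's row: "*"*n+"\n"  or  "*"+" "*(n-2)+"*"+"\n"  (on List Char)
def hsRowA (n i : Int) : List Char :=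
  if i = 0 ∨ i = n - 1 then
    PySem.List.pyRepeat ['*'] n ++ ['\n']
  else
    ['*'] ++ PySem.List.pyRepeat [' '] (n - 2) ++ ['*'] ++ ['\n']

-- the while loop: i counts up while i < n; fuel bounds the recursion
def hsLoopA (n i : Int) (fuel : Nat) (square : List Char) : List Char :=
  match fuel with
  | 0 => square
  | fuel + 1 => if i < n then hsLoopA n (i + 1) fuel (square ++ hsRowA n i) else square

def hollow_square (n : Int) : String :=
  if n < 1 then "" else
  String.ofList (PySem.Chars.rstrip (hsLoopA n 0 n.toNat []))

-- ===== PORT B =====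
-- one row of B: per-cell border decision over j in range(n)
def hsRowB (n i : Int) : List Char :=
  (PySem.List.pyRange 0 n 1).map
    (fun j => if i = 0 ∨ i = n - 1 ∨ j = 0 ∨ j = n - 1 then '*' else ' ')

def hollow_square_alt (n : Int) : String :=
  if n < 1 then "" else
  String.ofList (PySem.Chars.join ['\n'] ((PySem.List.pyRange 0 n 1).map (hsRowB n)))

-- ===== PRECONDITION & SPEC =====
def Spec_hollow_square (n : Int) (out : String) : Prop := out = hollow_square_alt n
instance (n : Int) (out : String) : Decidable (Spec_hollow_square n out) := by unfold Spec_hollow_square; infer_instance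

-- ===== CLAIM (what is proved, stated in full; the proofs are below) =====
def Claim_equal_hollow_square : Prop := ∀ (n : Int), Dom_hollow_square n → Spec_hollow_square n (hollow_square n)

-- ===== LEMMAS AND PROOFS =====

-- A's loop unrolls to the concatenation of its rows
theorem hsLoopA_spec (n : Int) : ∀ (fuel : Nat) (i : Int) (acc : List Char),
    (fuel : Int) = n - i →
    hsLoopA n i fuel acc = acc ++ (PySem.List.pyRange i n 1).flatMap (hsRowA n) := by
  intro fuel
  induction fuel with
  | zero =>
    intro i acc h
    rw [PySem.List.pyRange_one_eq_nil (by omega)]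
    simp [hsLoopA]
  | succ fuel ih =>
    intro i acc h
    have hin : i < n := by omega
    rw [hsLoopA, if_pos hin, ih (i + 1) (acc ++ hsRowA n i) (by push_cast at h ⊢; omega)]
    rw [PySem.List.pyRange_one_cons hin, List.flatMap_cons, List.append_assoc]

-- every row of A is B's row plus a trailing newline
theorem row_eq (n i : Int) (h0 : 0 ≤ i) (h1 : i < n) :
    hsRowA n i = hsRowB n i ++ ['\n'] := by
  by_cases hb : i = 0 ∨ i = n - 1
  · have hB : hsRowB n i = List.replicate n.toNat '*' := by
      have hmap : hsRowB n i = (PySem.List.pyRange 0 n 1).map (fun _ => '*') := by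
        apply List.map_congr_left
        intro j _
        rcases hb with h | h <;> simp [h]
      rw [hmap, List.map_const', PySem.List.length_pyRange_one]
      norm_num
    rw [hB, hsRowA, if_pos hb, PySem.List.pyRepeat_singleton]
  · rw [not_or] at hb
    obtain ⟨hi0, hi1⟩ := hb
    have hn3 : 3 ≤ n := by omega
    have hsplit : PySem.List.pyRange 0 n 1
        = PySem.List.pyRange 0 1 1 ++ (PySem.List.pyRange 1 (n - 1) 1 ++ PySem.List.pyRange (n - 1) n 1) := by
      rw [← PySem.List.pyRange_one_append 1 (n - 1) n (by omega) (by omega),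
          ← PySem.List.pyRange_one_append 0 1 n (by omega) (by omega)]
    have h01 : PySem.List.pyRange 0 1 1 = [(0 : Int)] := by
      simpa using PySem.List.pyRange_one_singleton (0 : Int)
    have hlast : PySem.List.pyRange (n - 1) n 1 = [n - 1] := by
      simpa using PySem.List.pyRange_one_singleton (n - 1)
    have hmid : (PySem.List.pyRange 1 (n - 1) 1).map
        (fun j => if i = 0 ∨ i = n - 1 ∨ j = 0 ∨ j = n - 1 then '*' else ' ')
        = List.replicate (n - 2).toNat ' ' := by
      have hmap : (PySem.List.pyRange 1 (n - 1) 1).map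
          (fun j => if i = 0 ∨ i = n - 1 ∨ j = 0 ∨ j = n - 1 then '*' else ' ')
          = (PySem.List.pyRange 1 (n - 1) 1).map (fun _ => ' ') := by
        apply List.map_congr_left
        intro j hj
        rw [PySem.List.mem_pyRange_one] at hj
        have hj0 : j ≠ 0 := by omega
        have hj1 : j ≠ n - 1 := by omega
        simp [hi0, hi1, hj0, hj1]
      rw [hmap, List.map_const', PySem.List.length_pyRange_one]
      congr 1
      omega
    rw [hsRowA, if_neg (not_or.mpr ⟨hi0, hi1⟩), hsRowB, hsplit]
    rw [List.map_append, List.map_append, h01, hlast, hmid]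
    simp [PySem.List.pyRepeat_singleton]

-- every row of B ends in '*'
theorem rowB_ends_star (n i : Int) (h0 : 0 ≤ i) (h1 : i < n) :
    ∃ r, hsRowB n i = r ++ ['*'] := by
  refine ⟨(PySem.List.pyRange 0 (n - 1) 1).map
    (fun j => if i = 0 ∨ i = n - 1 ∨ j = 0 ∨ j = n - 1 then '*' else ' '), ?_⟩
  have hlast : PySem.List.pyRange (n - 1) n 1 = [n - 1] := by
    simpa using PySem.List.pyRange_one_singleton (n - 1)
  rw [hsRowB, PySem.List.pyRange_one_append 0 (n - 1) n (by omega) (by omega),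
      List.map_append, hlast]
  simp only [List.map_cons, List.map_nil]
  rw [if_pos (Or.inr (Or.inr (Or.inr trivial)))]

-- rstrip passes over a prefix when the rstripped suffix is nonempty
theorem rstrip_append_left (a b : List Char) (hb : PySem.Chars.rstrip b ≠ []) :
    PySem.Chars.rstrip (a ++ b) = a ++ PySem.Chars.rstrip b := by
  have hdw : List.dropWhile PySem.Chars.isspace b.reverse = (PySem.Chars.rstrip b).reverse := by
    simp [PySem.Chars.rstrip]
  have hstep : PySem.Chars.rstrip (a ++ b)
      = (List.dropWhile PySem.Chars.isspace ((a ++ b).reverse)).reverse := rfl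
  have hne : ¬ ((PySem.Chars.rstrip b).reverse).isEmpty = true := by
    simp [List.isEmpty_iff, hb]
  rw [hstep, List.reverse_append, List.dropWhile_append, hdw, if_neg hne,
      List.reverse_append, List.reverse_reverse, List.reverse_reverse]

set_option maxRecDepth 4096 in
theorem rstrip_star_nl (r : List Char) : PySem.Chars.rstrip ((r ++ ['*']) ++ ['\n']) = r ++ ['*'] := by
  simp [PySem.Chars.rstrip, PySem.Chars.isspace]

-- rstrip of rows-with-newlines is the '\n'-join, when every row ends in '*'
theorem rstrip_flatMap (rs : List (List Char)) (hne : rs ≠ [])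
    (h : ∀ r ∈ rs, ∃ r', r = r' ++ ['*']) :
    PySem.Chars.rstrip (rs.flatMap (fun r => r ++ ['\n'])) = PySem.Chars.join ['\n'] rs := by
  induction rs with
  | nil => exact absurd rfl hne
  | cons r rest ih =>
    obtain ⟨r', hr⟩ := h r (List.mem_cons_self ..)
    cases rest with
    | nil =>
      simp only [List.flatMap_cons, List.flatMap_nil, List.append_nil, PySem.Chars.join_singleton]
      rw [hr, rstrip_star_nl]
    | cons q t =>
      have hrest : PySem.Chars.rstrip ((q :: t).flatMap (fun r => r ++ ['\n']))
          = PySem.Chars.join ['\n'] (q :: t) :=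
        ih (by simp) (fun x hx => h x (List.mem_cons_of_mem _ hx))
      obtain ⟨q', hq⟩ := h q (by simp)
      have hjoin_ne : PySem.Chars.join ['\n'] (q :: t) ≠ [] := by
        cases t with
        | nil => rw [PySem.Chars.join_singleton, hq]; simp
        | cons u v => rw [PySem.Chars.join_cons_cons, hq]; simp
      rw [List.flatMap_cons, rstrip_append_left _ _ (by rw [hrest]; exact hjoin_ne),
          hrest, PySem.Chars.join_cons_cons, List.append_assoc]

-- ===== VERDICT (by name: the statement is the Claim_ definition above) =====
theorem hollow_square_spec : Claim_equal_hollow_square := by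
  intro n _
  unfold Spec_hollow_square hollow_square hollow_square_alt
  by_cases hn : n < 1
  · simp [hn]
  · simp only [hn, if_false]
    congr 1
    have hunroll := hsLoopA_spec n n.toNat 0 [] (by omega)
    rw [hunroll, List.nil_append]
    have hflat : (PySem.List.pyRange 0 n 1).flatMap (hsRowA n)
        = ((PySem.List.pyRange 0 n 1).map (hsRowB n)).flatMap (fun r => r ++ ['\n']) := by
      rw [List.flatMap_map]
      apply List.flatMap_congr
      intro i hi
      rw [PySem.List.mem_pyRange_one] at hi
      exact row_eq n i hi.1 hi.2
    rw [hflat]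
    apply rstrip_flatMap
    · apply List.ne_nil_of_length_pos
      simp only [List.length_map, PySem.List.length_pyRange_one]
      omega
    · intro r hr
      simp only [List.mem_map] at hr
      obtain ⟨i, hi, rfl⟩ := hr
      rw [PySem.List.mem_pyRange_one] at hi
      exact rowB_ends_star n i hi.1 hi.2
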